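-- pv_equiv track=rewrite | github.com/MeetKai/functionary | tests/test_prompt_creation.py | extract_unmasked_chunks
-- ===== SOURCE A (Python) =====
-- from typing import List, Callable
--
-- def extract_unmasked_chunks(labels: List[int]) -> List[List[int]]:
--     """This function is used to extract unmasked chunks of integer
--     For example, labels = [-100, -100, 1, 2, 3, -100, -100, 4, 5] --> chunks = [[1,2,3], [4,5]]
--     Args:
--         labels (List[int]): list of integer containing token_id and -100
--
--     Returns:
--         List[List[int]]: list of chunk, for example: [[1,2,3], [4,5]]
--     """
--     chunks = []
--     chunk = []
--     for token_id in labels: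
--         if token_id != -100:
--             chunk.append(token_id)
--         else:
--             if len(chunk) > 0:
--                 chunks.append(chunk)
--                 chunk = []
--     if len(chunk) > 0:
--         chunks.append(chunk)
--     return chunks
-- ===== SOURCE B (Python) =====
-- from itertools import groupby
-- from typing import List
--
-- def extract_unmasked_chunks(labels: List[int]) -> List[List[int]]:
--     return [list(g) for k, g in groupby(labels, key=lambda t: t != -100) if k]
-- ===== Notes on version B (the rewrite author's own statement) =====
-- stated objective: idiomatic
-- what changed: Replaced the explicit accumulator-and-flush state machine with itertools.groupby: group consecutive elements by (t != -100) and keep only the True groups.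
import Mathlib
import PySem

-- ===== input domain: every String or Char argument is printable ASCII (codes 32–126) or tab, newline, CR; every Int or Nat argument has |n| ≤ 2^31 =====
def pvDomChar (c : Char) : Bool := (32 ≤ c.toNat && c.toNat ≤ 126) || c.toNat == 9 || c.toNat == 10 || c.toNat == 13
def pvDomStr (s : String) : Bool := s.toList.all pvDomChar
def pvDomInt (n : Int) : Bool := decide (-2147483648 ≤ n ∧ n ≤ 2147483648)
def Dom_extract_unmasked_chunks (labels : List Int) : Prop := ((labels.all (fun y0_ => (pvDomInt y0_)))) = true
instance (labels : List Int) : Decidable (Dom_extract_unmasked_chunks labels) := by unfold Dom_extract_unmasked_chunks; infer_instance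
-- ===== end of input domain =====

-- B replaces A's accumulator-and-flush state machine with a groupby-style
-- take/drop of maximal runs of non -100 elements (idiomatic; same cost).

-- ===== PORT A =====
-- A's loop: state (chunks, chunk); append to chunk on non -100, flush on -100; final flush.
def pvStepA (s : List (List Int) × List Int) (t : Int) : List (List Int) × List Int :=
  if t ≠ -100 then (s.1, s.2 ++ [t])
  else if s.2.length > 0 then (s.1 ++ [s.2], ([] : List Int))
  else s

def extract_unmasked_chunks (labels : List Int) : List (List Int) :=
  let s := labels.foldl pvStepA (([] : List (List Int)), ([] : List Int))
  if s.2.length > 0 then s.1 ++ [s.2] else s.1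

-- ===== PORT B =====
-- Source B's groupby: each maximal run of elements ≠ -100 becomes one chunk, runs of -100 are dropped.
def extract_unmasked_chunks_alt (labels : List Int) : List (List Int) :=
  match labels with
  | [] => []
  | x :: xs =>
    if x = -100 then extract_unmasked_chunks_alt xs
    else (x :: xs.takeWhile (· ≠ -100)) :: extract_unmasked_chunks_alt (xs.dropWhile (· ≠ -100))
termination_by labels.length
decreasing_by
  · simp
  · exact Nat.lt_succ_of_le (List.length_dropWhile_le _ _)

-- ===== PRECONDITION & SPEC =====
def Spec_extract_unmasked_chunks (labels : List Int) (out : List (List Int)) : Prop := out = extract_unmasked_chunks_alt labels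
instance (labels : List Int) (out : List (List Int)) : Decidable (Spec_extract_unmasked_chunks labels out) := by unfold Spec_extract_unmasked_chunks; infer_instance

-- ===== CLAIM (what is proved, stated in full; the proofs are below) =====
def Claim_equal_extract_unmasked_chunks : Prop := ∀ (labels : List Int), Dom_extract_unmasked_chunks labels → Spec_extract_unmasked_chunks labels (extract_unmasked_chunks labels)

-- ===== LEMMAS AND PROOFS =====

-- recursive reading of A's fold-then-flush, with pending chunk as parameter
def pvG (chunk : List Int) : List Int → List (List Int)
  | [] => if chunk.length > 0 then [chunk] else []
  | t :: rest =>
    if t ≠ -100 then pvG (chunk ++ [t]) rest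
    else if chunk.length > 0 then chunk :: pvG [] rest
    else pvG [] rest

theorem foldA_eq_pvG : ∀ (ls : List Int) (chunks : List (List Int)) (chunk : List Int),
    (let s := ls.foldl pvStepA (chunks, chunk);
     if s.2.length > 0 then s.1 ++ [s.2] else s.1) = chunks ++ pvG chunk ls := by
  intro ls
  induction ls with
  | nil =>
    intro chunks chunk
    simp only [List.foldl, pvG]
    split <;> simp
  | cons t rest ih =>
    intro chunks chunk
    simp only [List.foldl, pvG, pvStepA]
    by_cases ht : t ≠ -100
    · simp [ht, ih]
    · simp at ht
      by_cases hc : chunk.length > 0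
      · simp [ht, hc, ih]
      · have hce : chunk = [] := by simpa using hc
        simp [ht, hce, ih]

theorem pvG_spec : ∀ (ls : List Int),
    (pvG [] ls = extract_unmasked_chunks_alt ls) ∧
    (∀ chunk : List Int, chunk ≠ [] →
      pvG chunk ls = (chunk ++ ls.takeWhile (· ≠ -100)) :: extract_unmasked_chunks_alt (ls.dropWhile (· ≠ -100))) := by
  intro ls
  induction ls with
  | nil =>
    refine ⟨by simp [pvG, extract_unmasked_chunks_alt], ?_⟩
    intro chunk hc
    simp [pvG, extract_unmasked_chunks_alt, List.length_pos_iff, hc]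
  | cons t rest ih =>
    by_cases ht : t = -100
    · constructor
      · simp [pvG, ht, extract_unmasked_chunks_alt, ih.1]
      · intro chunk hc
        simp [pvG, ht, List.length_pos_iff, hc, List.takeWhile, List.dropWhile,
          extract_unmasked_chunks_alt, ih.1]
    · constructor
      · rw [show pvG [] (t :: rest) = pvG [t] rest by simp [pvG, ht]]
        rw [ih.2 [t] (by simp)]
        simp [extract_unmasked_chunks_alt, ht]
      · intro chunk hc
        rw [show pvG chunk (t :: rest) = pvG (chunk ++ [t]) rest by simp [pvG, ht]]
        rw [ih.2 (chunk ++ [t]) (by simp)]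
        simp [List.takeWhile, List.dropWhile, ht]

-- ===== VERDICT (by name: the statement is the Claim_ definition above) =====
theorem extract_unmasked_chunks_spec : Claim_equal_extract_unmasked_chunks := by
  intro labels _
  unfold Spec_extract_unmasked_chunks extract_unmasked_chunks
  rw [foldA_eq_pvG labels [] []]
  simp [(pvG_spec labels).1]
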